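-- pv_equiv track=rewrite | github.com/HuangFuSL/python-issues | pyissues/cli.py | _get_horiz_line
-- ===== SOURCE A (Python) =====
-- from typing import Dict, Iterable, List
--
-- _WIDTH = 80
--
-- def _get_horiz_line(
--         tabs_up: List[int] = list(),
--         tabs_down: List[int] = list(),
--         length: int = _WIDTH,
--         char: str = "-") -> str:
--     splits, ret = set(), ""
--     base = 0
--     for i in tabs_up:
--         base += 3 + i
--         splits.add(base)
--     base = 0
--     for i in tabs_down:
--         base += 3 + i
--         splits.add(base)
--     splits.add(0)
--     for _ in range(length):
--         ret += "+" if _ in splits else char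
--     return ret
-- ===== SOURCE B (Python) =====
-- from typing import List
--
-- _WIDTH = 80
--
--
-- def _get_horiz_line(
--         tabs_up: List[int] = list(),
--         tabs_down: List[int] = list(),
--         length: int = _WIDTH,
--         char: str = "-") -> str:
--     marks = {0}
--     for tabs in (tabs_up, tabs_down):
--         base = 0
--         for i in tabs:
--             base += 3 + i
--             marks.add(base)
--     cells = [char] * length
--     for pos in marks:
--         if 0 <= pos < length:
--             cells[pos] = "+"
--     return "".join(cells)
-- ===== Notes on version B (the rewrite author's own statement) =====
-- stated objective: alternative
-- what changed: Instead of testing every one of the length positions for set membership and growing the string with repeated +=, B allocates [char]*length once, writes '+' only at the in-range split positions, and joins once at the end.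
import Mathlib
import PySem

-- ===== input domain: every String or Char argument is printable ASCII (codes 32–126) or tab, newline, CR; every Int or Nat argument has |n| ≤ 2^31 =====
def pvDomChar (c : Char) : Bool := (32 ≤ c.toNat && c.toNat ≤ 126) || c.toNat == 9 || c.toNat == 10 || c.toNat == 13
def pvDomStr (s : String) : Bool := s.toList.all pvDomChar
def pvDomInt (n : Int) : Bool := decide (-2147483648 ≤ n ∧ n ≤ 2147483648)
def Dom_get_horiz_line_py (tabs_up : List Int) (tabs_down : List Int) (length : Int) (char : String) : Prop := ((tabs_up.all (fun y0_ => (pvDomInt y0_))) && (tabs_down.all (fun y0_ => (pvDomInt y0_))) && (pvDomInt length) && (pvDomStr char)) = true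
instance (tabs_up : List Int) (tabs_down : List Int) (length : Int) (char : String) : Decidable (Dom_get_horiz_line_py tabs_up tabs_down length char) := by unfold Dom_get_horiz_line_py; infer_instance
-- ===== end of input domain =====

-- B writes '+' only at the in-range split positions of a preallocated [char]*length list and joins once,
-- instead of testing every position for set membership and growing the string by repeated += (alternative, same cost).

-- ===== PORT A =====
-- one 'for i in tabs: base += 3 + i; splits.add(base)' loop, carried state = (splits, base)
def pvTabFold (tabs : List Int) (s : PySem.Set Int) : PySem.Set Int × Int :=
  tabs.foldl (fun (p : PySem.Set Int × Int) i =>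
    let b := p.2 + (3 + i); (PySem.Set.add p.1 b, b)) (s, 0)

def get_horiz_line_py (tabs_up : List Int) (tabs_down : List Int) (length : Int) (char : String) : String :=
  let p1 := pvTabFold tabs_up PySem.Set.empty
  let p2 := pvTabFold tabs_down p1.1
  let splits := PySem.Set.add p2.1 0
  (PySem.List.pyRange 0 length 1).foldl
    (fun ret j => ret ++ (if PySem.Set.contains splits j then "+" else char)) ""

-- ===== PORT B =====
def get_horiz_line_py_alt (tabs_up : List Int) (tabs_down : List Int) (length : Int) (char : String) : String :=
  let marks := [tabs_up, tabs_down].foldl (fun m tabs => (pvTabFold tabs m).1)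
    (PySem.Set.add PySem.Set.empty 0)
  let cells := PySem.List.pyRepeat [char] length
  let cells := marks.foldl (fun cs pos =>
    if 0 ≤ pos ∧ pos < length then PySem.List.pySetD cs pos "+" else cs) cells
  PySem.Str.join "" cells

-- ===== PRECONDITION & SPEC =====
def Spec_get_horiz_line_py (tabs_up : List Int) (tabs_down : List Int) (length : Int) (char : String) (out : String) : Prop := out = get_horiz_line_py_alt tabs_up tabs_down length char
instance (tabs_up : List Int) (tabs_down : List Int) (length : Int) (char : String) (out : String) : Decidable (Spec_get_horiz_line_py tabs_up tabs_down length char out) := by unfold Spec_get_horiz_line_py; infer_instance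

-- ===== CLAIM (what is proved, stated in full; the proofs are below) =====
def Claim_equal_get_horiz_line_py : Prop := ∀ (tabs_up : List Int) (tabs_down : List Int) (length : Int) (char : String), Dom_get_horiz_line_py tabs_up tabs_down length char → Spec_get_horiz_line_py tabs_up tabs_down length char (get_horiz_line_py tabs_up tabs_down length char)

-- ===== LEMMAS AND PROOFS =====

-- the successive bases 'b + (3+i1), b + (3+i1) + (3+i2), ...' of one tab loop
def pvBases (b : Int) : List Int → List Int
  | [] => []
  | i :: t => (b + (3 + i)) :: pvBases (b + (3 + i)) t

theorem mem_pvTabFold_aux (tabs : List Int) (s : PySem.Set Int) (b x : Int) :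
    x ∈ (tabs.foldl (fun (p : PySem.Set Int × Int) i =>
      let nb := p.2 + (3 + i); (PySem.Set.add p.1 nb, nb)) (s, b)).1
    ↔ x ∈ s ∨ x ∈ pvBases b tabs := by
  induction tabs generalizing s b with
  | nil => simp [pvBases]
  | cons i t ih =>
      simp only [List.foldl_cons, pvBases, ih, PySem.Set.mem_add, List.mem_cons]
      tauto

theorem mem_pvTabFold (tabs : List Int) (s : PySem.Set Int) (x : Int) :
    x ∈ (pvTabFold tabs s).1 ↔ x ∈ s ∨ x ∈ pvBases 0 tabs := by
  unfold pvTabFold; exact mem_pvTabFold_aux tabs s 0 x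

-- A's membership test and B's set agree element-wise
theorem mem_marks_iff (tabs_up tabs_down : List Int) (x : Int) :
    (x ∈ ([tabs_up, tabs_down].foldl (fun m tabs => (pvTabFold tabs m).1)
        (PySem.Set.add PySem.Set.empty 0))
    ↔ x ∈ PySem.Set.add (pvTabFold tabs_down (pvTabFold tabs_up PySem.Set.empty).1).1 0) := by
  simp only [List.foldl_cons, List.foldl_nil, mem_pvTabFold, PySem.Set.mem_add]
  simp [PySem.Set.empty]
  tauto

-- A's string loop as a flatten on the char-list side
theorem foldl_str_append_toList (l : List Int) (f : Int → String) (acc : String) :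
    (l.foldl (fun ret j => ret ++ f j) acc).toList
    = acc.toList ++ (l.map (fun j => (f j).toList)).flatten := by
  induction l generalizing acc with
  | nil => simp
  | cons j t ih => simp [ih]

-- setting an element of a mapped range rewrites the mapped function
theorem set_map_range (n j : Nat) (g : Nat → String) (v : String) (_hj : j < n) :
    ((List.range n).map g).set j v
    = (List.range n).map (fun k => if k = j then v else g k) := by
  apply List.ext_getElem
  · simp
  · intro k hk _
    simp only [List.getElem_set, List.getElem_map, List.getElem_range]
    rcases eq_or_ne j k with h | h
    · simp [h]
    · simp [h, Ne.symm h]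

-- B's write loop over the marks turns [char]*length into the position-wise picture
theorem writes_eq_map (marks : List Int) (length : Int) (g : Nat → String) :
    marks.foldl (fun cs pos =>
        if 0 ≤ pos ∧ pos < length then PySem.List.pySetD cs pos "+" else cs)
      ((List.range length.toNat).map g)
    = (List.range length.toNat).map
        (fun (k : Nat) => if (k : Int) ∈ marks then "+" else g k) := by
  induction marks generalizing g with
  | nil =>
      simp only [List.foldl_nil]
      apply List.map_congr_left
      intro k _
      simp
  | cons pos rest ih =>
      simp only [List.foldl_cons]
      by_cases h : 0 ≤ pos ∧ pos < length
      · rw [if_pos h, PySem.List.pySetD_of_nonneg _ _ h.1,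
          set_map_range length.toNat pos.toNat g "+" (by omega), ih]
        apply List.map_congr_left
        intro k hk
        simp only [List.mem_range] at hk
        by_cases hr : (k : Int) ∈ rest
        · simp [hr]
        · have hiff : ((k : Int) = pos) ↔ k = pos.toNat := by omega
          by_cases hkp : k = pos.toNat <;> simp_all
      · rw [if_neg h, ih]
        apply List.map_congr_left
        intro k hk
        simp only [List.mem_range] at hk
        have h' : ¬ (0 ≤ pos ∧ pos < length) := h
        have hkpos : (k : Int) ≠ pos := by
          rcases not_and_or.mp h' with hneg | hge
          · omega
          · omega
        simp [hkpos]

-- ''.join on the char-list side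
theorem join_toList (cells : List String) :
    (PySem.Str.join "" cells).toList = (cells.map String.toList).flatten := by
  rw [PySem.Str.toList_join]
  have : ("" : String).toList = ([] : List Char) := by simp
  rw [this]
  generalize cells.map String.toList = L
  induction L with
  | nil => simp [PySem.Chars.join_nil]
  | cons p t ih =>
      cases t with
      | nil => simp [PySem.Chars.join_singleton]
      | cons q u =>
          rw [PySem.Chars.join_cons_cons]
          simp only [List.flatten_cons] at ih ⊢
          simp [ih]

-- ===== VERDICT (by name: the statement is the Claim_ definition above) =====
theorem get_horiz_line_py_spec : Claim_equal_get_horiz_line_py := by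
  intro tabs_up tabs_down length char _
  unfold Spec_get_horiz_line_py
  simp only [get_horiz_line_py, get_horiz_line_py_alt]
  apply String.ext
  rw [join_toList, PySem.List.pyRepeat_singleton,
    ← show (List.range length.toNat).map (fun (_ : Nat) => char) = List.replicate length.toNat char
        by simp,
    writes_eq_map, foldl_str_append_toList, PySem.List.pyRange_one]
  simp only [List.map_map, Int.sub_zero]
  apply congrArg List.flatten
  apply List.map_congr_left
  intro k _
  simp only [Function.comp_apply, zero_add]
  by_cases hm : (k : Int) ∈ ([tabs_up, tabs_down].foldl (fun m tabs => (pvTabFold tabs m).1)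
      (PySem.Set.add PySem.Set.empty 0))
  · rw [if_pos ((PySem.Set.contains_iff _ _).mpr ((mem_marks_iff tabs_up tabs_down k).mp hm)),
      if_pos hm]
  · rw [if_neg (fun hc => hm ((mem_marks_iff tabs_up tabs_down k).mpr
        ((PySem.Set.contains_iff _ _).mp hc))),
      if_neg hm]
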